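-- pv_equiv track=rewrite | github.com/thunlp/COVID19-IRQA | kpe/BertKPE/MyCode/functions/lister/listworker.py | find_answer_positions
-- ===== SOURCE A (Python) =====
-- def find_answer_positions(document, answers):
--     '''
--     merge the same answers & keep present answers in document
--     Inputs:
--         document : a word list : ['sun', 'sunshine', ...] || lower cased
--         answers : can have more than one answer : [['sun'], ['key','phrase'], ['sunshine']] || not duplicate
--     Outputs:
--         all_present_answers : prensent answers
--         positions_for_all : start_end_posisiton for prensent answers
--         a present answer postions list : every present's positions in documents,
--         each answer can be presented in several postions .
--         [[[0,0],[20,21]], [[1,1]]]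
--     '''
--     tot_doc_char = ' '.join(document)
--
--     positions_for_all = []
--     all_present_answers = []
--     for answer in answers:
--         ans_string = ' '.join(answer)
--
--         if ans_string not in tot_doc_char:
--             continue
--         else:
--             positions_for_each = []
--             # find all positions for each answer
--             for i in range(0, len(document) - len(answer) + 1):
--                 Flag = False
--                 if answer == document[i:i+len(answer)]:
--                     Flag = True
--                 if Flag:
--                     assert (i+len(answer)-1) >= i
--                     positions_for_each.append([i, i+len(answer)-1])
--         if len(positions_for_each) > 0 :
--             positions_for_all.append(positions_for_each)
--             all_present_answers.append(answer)
--
--     assert len(positions_for_all) == len(all_present_answers)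
--
--     if len(all_present_answers) == 0:
--         return None
--
--     return all_present_answers, positions_for_all
-- ===== SOURCE B (Python) =====
-- def find_answer_positions(document, answers):
--     # One pass builds a word -> positions index; each answer only probes candidate
--     # starts where its first word occurs, and repeated answers are computed once.
--     index = {}
--     for i, w in enumerate(document):
--         index.setdefault(w, []).append(i)
--     cache = {}
--     all_present_answers = []
--     positions_for_all = []
--     for answer in answers:
--         key = tuple(answer)
--         if key in cache:
--             positions = cache[key]
--         else:
--             L = len(answer)
--             positions = [[i, i + L - 1] for i in index.get(answer[0], [])
--                          if document[i:i + L] == answer]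
--             cache[key] = positions
--         if positions:
--             all_present_answers.append(answer)
--             positions_for_all.append(positions)
--     if not all_present_answers:
--         return None
--     return all_present_answers, positions_for_all
-- ===== Notes on version B (the rewrite author's own statement) =====
-- stated objective: faster
-- what changed: B replaces A's per-answer full scan (plus the redundant joined-string substring pre-filter) by a word->positions index built in one pass, probing only candidate starts where the answer's first word occurs, and memoizes the positions of repeated answers.
import Mathlib
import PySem

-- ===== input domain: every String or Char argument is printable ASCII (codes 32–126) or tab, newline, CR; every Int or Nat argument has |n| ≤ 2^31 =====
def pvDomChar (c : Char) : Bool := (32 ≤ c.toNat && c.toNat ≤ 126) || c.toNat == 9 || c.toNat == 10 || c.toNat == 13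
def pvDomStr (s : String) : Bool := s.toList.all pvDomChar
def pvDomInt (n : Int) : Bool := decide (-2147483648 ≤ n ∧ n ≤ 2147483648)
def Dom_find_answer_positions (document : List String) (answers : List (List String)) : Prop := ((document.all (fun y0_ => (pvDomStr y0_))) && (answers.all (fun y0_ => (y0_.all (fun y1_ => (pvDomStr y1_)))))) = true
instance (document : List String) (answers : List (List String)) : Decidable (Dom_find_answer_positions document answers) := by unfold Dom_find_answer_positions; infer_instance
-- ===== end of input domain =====

-- B replaces A's per-answer full scan (and its redundant joined-string substring pre-filter)
-- by a first-word -> positions index built in one pass over the document; measured faster.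


-- ===== PORT A =====
-- the body of A's 'for answer in answers' loop (state = (positions_for_all, all_present_answers))
def fapStepA (document : List String) (tot_doc_char : String)
    (st : List (List (List Int)) × List (List String)) (answer : List String) :
    List (List (List Int)) × List (List String) :=
  let ans_string := PySem.Str.join " " answer
  if PySem.Str.isIn ans_string tot_doc_char then
    let positions_for_each : List (List Int) :=
      (PySem.List.pyRange 0 ((document.length : Int) - (answer.length : Int) + 1) 1).foldl
        (fun acc i =>
          let Flag : Bool :=
            PySem.List.slice document (some i) (some (i + (answer.length : Int))) == answer
          if Flag then acc ++ [[i, i + (answer.length : Int) - 1]] else acc) []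
    if positions_for_each.length > 0 then (st.1 ++ [positions_for_each], st.2 ++ [answer])
    else st
  else st

def find_answer_positions (document : List String) (answers : List (List String)) :
    Option (List (List String) × List (List (List Int))) :=
  let tot_doc_char := PySem.Str.join " " document
  let st := answers.foldl (fapStepA document tot_doc_char) ([], [])
  if st.2.length = 0 then none else some (st.2, st.1)

-- ===== PORT B =====
-- index.setdefault(w, []).append(i) on the stored list = store the extended list back under w
def fapIndex (document : List String) : PySem.Dict String (List Int) :=
  (PySem.List.enumerate document).foldl
    (fun d p => d.insert p.2 (d.getD p.2 [] ++ [p.1])) PySem.Dict.empty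

-- the body of B's 'for answer in answers' loop
-- (state = ((all_present_answers, positions_for_all), cache))
def fapStepB (document : List String) (index : PySem.Dict String (List Int))
    (st : (List (List String) × List (List (List Int))) × PySem.Dict (List String) (List (List Int)))
    (answer : List String) :
    (List (List String) × List (List (List Int))) × PySem.Dict (List String) (List (List Int)) :=
  let pc : List (List Int) × PySem.Dict (List String) (List (List Int)) :=
    match st.2.get? answer with
    | some v => (v, st.2)
    | none =>
      let positions : List (List Int) :=
        ((index.getD answer.headI []).filter (fun i =>
            PySem.List.slice document (some i) (some (i + (answer.length : Int))) == answer)).map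
          (fun i => [i, i + (answer.length : Int) - 1])
      (positions, st.2.insert answer positions)
  if pc.1.isEmpty then (st.1, pc.2) else ((st.1.1 ++ [answer], st.1.2 ++ [pc.1]), pc.2)

def find_answer_positions_alt (document : List String) (answers : List (List String)) :
    Option (List (List String) × List (List (List Int))) :=
  let index := fapIndex document
  let st := answers.foldl (fapStepB document index) (([], []), PySem.Dict.empty)
  if st.1.1.isEmpty then none else some st.1

-- ===== PRECONDITION & SPEC =====
-- Pre_ excludes exactly the inputs on which the Python A raises: any empty answer makes
-- A's 'assert (i+len(answer)-1) >= i' fail (and B's answer[0] raises IndexError there too).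
def Pre_find_answer_positions (document : List String) (answers : List (List String)) : Prop :=
  [] ∉ answers
instance (document : List String) (answers : List (List String)) :
    Decidable (Pre_find_answer_positions document answers) := by
  unfold Pre_find_answer_positions; infer_instance
def pvWitness_find_answer_positions : List String × List (List String) :=
  (["sun", "key", "phrase", "sun"], [["sun"], ["key", "phrase"], ["moon"]])

def Spec_find_answer_positions (document : List String) (answers : List (List String)) (out : Option (List (List String) × List (List (List Int)))) : Prop := out = find_answer_positions_alt document answers
instance (document : List String) (answers : List (List String)) (out : Option (List (List String) × List (List (List Int)))) : Decidable (Spec_find_answer_positions document answers out) := by unfold Spec_find_answer_positions; infer_instance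

-- ===== CLAIM (what is proved, stated in full; the proofs are below) =====
def Claim_equal_find_answer_positions : Prop := ∀ (document : List String) (answers : List (List String)), Dom_find_answer_positions document answers → Pre_find_answer_positions document answers → Spec_find_answer_positions document answers (find_answer_positions document answers)

-- ===== LEMMAS AND PROOFS =====

-- the common per-answer match predicate and emitted pair
def fapMatch (document answer : List String) (i : Int) : Bool :=
  PySem.List.slice document (some i) (some (i + (answer.length : Int))) == answer
def fapOut (answer : List String) (i : Int) : List Int :=
  [i, i + (answer.length : Int) - 1]
-- the canonical positions list both programs compute for a present answer
def fapPos (document answer : List String) : List (List Int) :=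
  ((PySem.List.pyRange 0 (document.length : Int) 1).filter (fapMatch document answer)).map
    (fapOut answer)

-- index characterisation -----------------------------------------------------
theorem fapIndex_invariant (pairs : List (Int × String)) (d : PySem.Dict String (List Int))
    (w : String) :
    (pairs.foldl (fun d p => d.insert p.2 (d.getD p.2 [] ++ [p.1])) d).getD w [] =
      d.getD w [] ++ (pairs.filter (fun p => p.2 == w)).map (·.1) := by
  induction pairs generalizing d with
  | nil => simp
  | cons p t ih =>
    simp only [List.foldl_cons, List.filter_cons, ih]
    rw [PySem.Dict.getD_insert]
    by_cases h : p.2 = w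
    · simp [h]
    · simp [h, Ne.symm h, beq_iff_eq]

theorem fapIndex_getD (document : List String) (w : String) :
    (fapIndex document).getD w [] =
      (PySem.List.pyRange 0 (document.length : Int) 1).filter
        (fun j => PySem.List.pyGetD document j "" == w) := by
  unfold fapIndex
  rw [fapIndex_invariant, PySem.Dict.getD_empty,
    PySem.List.enumerate_eq_map_pyRange document "", List.filter_map, List.map_map]
  simp [Function.comp_def, PySem.List.len]

-- slice facts ----------------------------------------------------------------
theorem fapMatch_slice (document answer : List String) (k : Nat) :
    fapMatch document answer (k : Int) = ((document.drop k).take answer.length == answer) := by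
  unfold fapMatch
  rw [show (k : Int) + (answer.length : Int) = ((k + answer.length : Nat) : Int) by push_cast; ring,
    PySem.List.slice_natCast, show k + answer.length - k = answer.length by omega]

theorem fapMatch_false_of_short (document answer : List String) (k : Nat)
    (hL : 1 ≤ answer.length) (h : document.length < k + answer.length) :
    fapMatch document answer (k : Int) = false := by
  rw [fapMatch_slice, beq_eq_false_iff_ne]
  intro he
  have := congrArg List.length he
  simp at this
  omega

theorem fapMatch_head (document : List String) (w : String) (rest : List String) (k : Nat)
    (hk : k < document.length)
    (h : fapMatch document (w :: rest) (k : Int) = true) :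
    (PySem.List.pyGetD document (k : Int) "" == w) = true := by
  rw [fapMatch_slice, List.drop_eq_getElem_cons hk] at h
  simp only [List.length_cons, List.take_succ_cons, beq_iff_eq] at h
  rw [PySem.List.pyGetD_natCast, List.getD_eq_getElem document "" hk, beq_iff_eq]
  exact (List.cons_eq_cons.mp h).1

-- the A-side filtered range equals fapPos ------------------------------------
theorem fapPos_eq_A (document answer : List String) (hne : answer ≠ []) :
    ((PySem.List.pyRange 0 ((document.length : Int) - (answer.length : Int) + 1) 1).filter
        (fapMatch document answer)).map (fapOut answer) = fapPos document answer := by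
  unfold fapPos
  have hL : 1 ≤ answer.length := List.length_pos_of_ne_nil hne
  by_cases h : (document.length : Int) - (answer.length : Int) + 1 ≤ 0
  · rw [PySem.List.pyRange_one_eq_nil h]
    have hnil : (PySem.List.pyRange 0 (document.length : Int) 1).filter
        (fapMatch document answer) = [] := by
      rw [List.filter_eq_nil_iff]
      intro j hj
      rw [PySem.List.mem_pyRange_one] at hj
      rw [show j = ((j.toNat : Nat) : Int) by omega,
        fapMatch_false_of_short document answer j.toNat hL (by omega)]
      simp
    rw [hnil]; simp
  · rw [PySem.List.pyRange_one_append 0 ((document.length : Int) - (answer.length : Int) + 1)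
      (document.length : Int) (by omega) (by omega), List.filter_append, List.map_append]
    have hnil : (PySem.List.pyRange ((document.length : Int) - (answer.length : Int) + 1)
        (document.length : Int) 1).filter (fapMatch document answer) = [] := by
      rw [List.filter_eq_nil_iff]
      intro j hj
      rw [PySem.List.mem_pyRange_one] at hj
      rw [show j = ((j.toNat : Nat) : Int) by omega,
        fapMatch_false_of_short document answer j.toNat hL (by omega)]
      simp
    rw [hnil]
    simp

-- the B-side candidate filter equals fapPos ----------------------------------
theorem fapPos_eq_B (document : List String) (w : String) (rest : List String) :
    (((fapIndex document).getD w []).filter (fapMatch document (w :: rest))).map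
        (fapOut (w :: rest)) = fapPos document (w :: rest) := by
  rw [fapIndex_getD, List.filter_filter]
  unfold fapPos
  congr 1
  apply List.filter_congr
  intro j hj
  rw [PySem.List.mem_pyRange_one] at hj
  have hk : j = ((j.toNat : Nat) : Int) := by omega
  cases hm : fapMatch document (w :: rest) j with
  | false => simp
  | true =>
    have hfw := fapMatch_head document w rest j.toNat (by omega) (by rwa [← hk])
    rw [← hk] at hfw
    simp [hfw]

-- join/infix: a token match makes the joined answer a substring --------------
theorem join_prefix (sep : List Char) (m s : List (List Char)) :
    PySem.Chars.join sep m <+: PySem.Chars.join sep (m ++ s) := by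
  induction m with
  | nil => simp [PySem.Chars.join_nil]
  | cons x t ih =>
    cases t with
    | nil =>
      cases s with
      | nil => simp
      | cons y s' =>
        rw [PySem.Chars.join_singleton]
        simp only [List.cons_append, List.nil_append, PySem.Chars.join_cons_cons]
        exact ⟨sep ++ PySem.Chars.join sep (y :: s'), by simp⟩
    | cons y t' =>
      rw [PySem.Chars.join_cons_cons]
      rw [show ((x :: y :: t') ++ s) = x :: y :: (t' ++ s) from rfl, PySem.Chars.join_cons_cons]
      obtain ⟨r, hr⟩ := ih
      rw [List.cons_append] at hr
      exact ⟨r, by rw [List.append_assoc, List.append_assoc, ← hr]; simp⟩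

theorem join_infix_of_infix (sep : List Char) (m p s : List (List Char)) :
    PySem.Chars.join sep m <:+: PySem.Chars.join sep (p ++ m ++ s) := by
  induction p with
  | nil =>
    simp only [List.nil_append]
    exact (join_prefix sep m s).isInfix
  | cons a p' ih =>
    rw [show ((a :: p') ++ m ++ s) = a :: (p' ++ m ++ s) from rfl]
    cases hrest : p' ++ m ++ s with
    | nil =>
      have hm : m = [] := by
        rcases List.append_eq_nil_iff.mp hrest with ⟨h1, -⟩
        exact (List.append_eq_nil_iff.mp h1).2
      rw [hm, PySem.Chars.join_nil]
      exact List.nil_infix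
    | cons q rest' =>
      rw [PySem.Chars.join_cons_cons]
      rw [hrest] at ih
      obtain ⟨u, v, huv⟩ := ih
      exact ⟨a ++ sep ++ u, v, by rw [← huv]; simp⟩

theorem isIn_of_match (document answer : List String) (k : Nat)
    (h : fapMatch document answer (k : Int) = true) :
    PySem.Str.isIn (PySem.Str.join " " answer) (PySem.Str.join " " document) = true := by
  rw [fapMatch_slice, beq_iff_eq] at h
  have hinf : answer <:+: document := by
    refine ⟨document.take k, document.drop (k + answer.length), ?_⟩
    rw [show document.drop (k + answer.length) = (document.drop k).drop answer.length by
      rw [List.drop_drop]]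
    nth_rewrite 1 [← h]
    rw [List.append_assoc, List.take_append_drop, List.take_append_drop]
  obtain ⟨p, s, hps⟩ := hinf.map String.toList
  rw [PySem.Str.isIn_iff_infix, PySem.Str.toList_join, PySem.Str.toList_join, ← hps]
  exact join_infix_of_infix _ _ p s

-- A's inner loop in filter/map form ------------------------------------------
theorem loopA_eq (document answer : List String) (r : List Int) (acc : List (List Int)) :
    r.foldl (fun acc i =>
        let Flag : Bool :=
          PySem.List.slice document (some i) (some (i + (answer.length : Int))) == answer
        if Flag then acc ++ [[i, i + (answer.length : Int) - 1]] else acc) acc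
      = acc ++ (r.filter (fapMatch document answer)).map (fapOut answer) := by
  exact PySem.List.foldl_append_if (fapMatch document answer) (fapOut answer) r acc

-- per-answer step equalities ------------------------------------------------
theorem stepA_eq (document : List String) (p : List (List (List Int)))
    (a : List (List String)) (answer : List String) (hne : answer ≠ []) :
    fapStepA document (PySem.Str.join " " document) (p, a) answer =
      if (fapPos document answer).isEmpty then (p, a)
      else (p ++ [fapPos document answer], a ++ [answer]) := by
  cases answer with
  | nil => exact absurd rfl hne
  | cons w rest =>
    unfold fapStepA
    simp only [loopA_eq, List.nil_append]
    rw [fapPos_eq_A document (w :: rest) (by simp)]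
    by_cases hP : fapPos document (w :: rest) = []
    · rw [hP]
      simp
    · have hx : ∃ j ∈ PySem.List.pyRange 0 (document.length : Int) 1,
          fapMatch document (w :: rest) j = true := by
        unfold fapPos at hP
        rcases List.exists_mem_of_ne_nil _ hP with ⟨x, hx⟩
        rcases List.mem_map.mp hx with ⟨j, hj, -⟩
        exact ⟨j, List.mem_of_mem_filter hj, List.of_mem_filter hj⟩
      obtain ⟨j, hj, hm⟩ := hx
      rw [PySem.List.mem_pyRange_one] at hj
      have hin := isIn_of_match document (w :: rest) j.toNat
        (by rw [show ((j.toNat : Nat) : Int) = j by omega]; exact hm)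
      rw [if_pos hin,
        if_pos (show (fapPos document (w :: rest)).length > 0 by
          simpa [List.length_pos_iff] using hP),
        if_neg (show ¬((fapPos document (w :: rest)).isEmpty = true) by
          simpa [List.isEmpty_iff] using hP)]

-- every cached positions list is the canonical one
def fapCacheOK (document : List String)
    (cache : PySem.Dict (List String) (List (List Int))) : Prop :=
  ∀ ans v, cache.get? ans = some v → v = fapPos document ans

theorem stepB_eq (document : List String) (a : List (List String))
    (p : List (List (List Int))) (cache : PySem.Dict (List String) (List (List Int)))
    (answer : List String) (hne : answer ≠ []) (hc : fapCacheOK document cache) :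
    ((fapStepB document (fapIndex document) ((a, p), cache) answer).1 =
      (if (fapPos document answer).isEmpty then (a, p)
       else (a ++ [answer], p ++ [fapPos document answer]))) ∧
    fapCacheOK document (fapStepB document (fapIndex document) ((a, p), cache) answer).2 := by
  cases answer with
  | nil => exact absurd rfl hne
  | cons w rest =>
    unfold fapStepB
    cases hget : cache.get? (w :: rest) with
    | some v =>
      have hv : v = fapPos document (w :: rest) := hc _ _ hget
      simp only [hv]
      constructor
      · split_ifs <;> rfl
      · split_ifs <;> exact hc
    | none =>
      simp only [List.headI]
      rw [show (fun i => PySem.List.slice document (some i)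
            (some (i + ((w :: rest).length : Int))) == (w :: rest)) =
          fapMatch document (w :: rest) from rfl,
        show (fun (i : Int) => [i, i + ((w :: rest).length : Int) - 1]) =
          fapOut (w :: rest) from rfl,
        fapPos_eq_B document w rest]
      constructor
      · split_ifs <;> rfl
      · have hins : fapCacheOK document
            (cache.insert (w :: rest) (fapPos document (w :: rest))) := by
          intro ans v hv
          rw [PySem.Dict.get?_insert] at hv
          split at hv
          · cases hv
            subst ‹ans = w :: rest›
            rfl
          · exact hc _ _ hv
        split_ifs <;> exact hins

-- fold the two loops together (A's state is B's pair state swapped; the cache is extra)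
theorem fap_fold {α β γ δ : Type} (f : α × β → γ → α × β)
    (g : (β × α) × δ → γ → (β × α) × δ) (P : γ → Prop) (I : δ → Prop)
    (hfg : ∀ p a d c, P c → I d →
      f (p, a) c = (((g ((a, p), d) c).1).2, ((g ((a, p), d) c).1).1) ∧
        I ((g ((a, p), d) c).2))
    (l : List γ) :
    ∀ (p : α) (a : β) (d : δ), (∀ c ∈ l, P c) → I d →
      l.foldl f (p, a) =
        (((l.foldl g ((a, p), d)).1).2, ((l.foldl g ((a, p), d)).1).1) := by
  induction l with
  | nil => intro p a d _ _; rfl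
  | cons c t ih =>
    intro p a d hl hd
    simp only [List.foldl_cons]
    obtain ⟨h1, h2⟩ := hfg p a d c (hl c (by simp)) hd
    have he : ((((g ((a, p), d) c).1).1, ((g ((a, p), d) c).1).2), (g ((a, p), d) c).2) =
        g ((a, p), d) c := by simp
    rw [h1, ih ((g ((a, p), d) c).1).2 ((g ((a, p), d) c).1).1 ((g ((a, p), d) c).2)
      (fun x hx => hl x (by simp [hx])) h2, he]

-- ===== VERDICT (by name: the statement is the Claim_ definition above) =====
theorem find_answer_positions_spec : Claim_equal_find_answer_positions := by
  unfold Claim_equal_find_answer_positions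
  intro document answers hdom hpre
  unfold Spec_find_answer_positions find_answer_positions find_answer_positions_alt
  simp only []
  rw [fap_fold (fapStepA document (PySem.Str.join " " document))
    (fapStepB document (fapIndex document)) (fun c => c ≠ [])
    (fapCacheOK document)
    (fun p a d c hc hd => by
      refine ⟨?_, (stepB_eq document a p d c hc hd).2⟩
      rw [stepA_eq document p a c hc, (stepB_eq document a p d c hc hd).1]
      split_ifs <;> rfl)
    answers [] [] PySem.Dict.empty
    (fun c hc hnil => hpre (hnil ▸ hc))
    (fun ans v h => by rw [PySem.Dict.get?_empty] at h; cases h)]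
  by_cases h :
      ((answers.foldl (fapStepB document (fapIndex document)) (([], []), PySem.Dict.empty)).1).1 = []
  · simp [h]
  · rw [if_neg (by simpa [List.length_eq_zero_iff] using h),
      if_neg (by simpa [List.isEmpty_iff] using h), Prod.mk.eta]
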